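-- pv_equiv track=rewrite | github.com/hji1014/HJI_Algorithm | Programmers/Lv_1/Lv_1_solution.py | solution
-- ===== SOURCE A (Python) =====
-- def solution(name, yearning, photo):
--     answer = []
--     score_dict = {}
--     for i, j in zip(name, yearning):
--         score_dict[i] = j
--     for i in range(len(photo)):
--         answer_score = 0
--         intersection = set(name) & set(photo[i])    # 교집합 찾기
--         intersection = list(intersection)
--         for j in intersection:
--             answer_score += score_dict[j]
--         answer.append(answer_score)
--     return answer
-- ===== SOURCE B (Python) =====
-- def solution(name, yearning, photo):
--     score = dict(zip(name, yearning))
--     photo_sets = [set(ph) for ph in photo]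
--     answer = [0] * len(photo)
--     for person, s in score.items():
--         answer = [a + s if person in ph else a for a, ph in zip(answer, photo_sets)]
--     return answer
-- ===== Notes on version B (the rewrite author's own statement) =====
-- stated objective: alternative
-- what changed: B transposes the traversal: instead of A's photo-outer loop that rebuilds set(name), intersects it with each photo and sums dict lookups over the intersection, B builds the score dict and one set per photo once, then loops person-outer over the dict's items, accumulating each person's score into a running answer list by a membership test per photo; no intersection is ever formed.
import Mathlib
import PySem

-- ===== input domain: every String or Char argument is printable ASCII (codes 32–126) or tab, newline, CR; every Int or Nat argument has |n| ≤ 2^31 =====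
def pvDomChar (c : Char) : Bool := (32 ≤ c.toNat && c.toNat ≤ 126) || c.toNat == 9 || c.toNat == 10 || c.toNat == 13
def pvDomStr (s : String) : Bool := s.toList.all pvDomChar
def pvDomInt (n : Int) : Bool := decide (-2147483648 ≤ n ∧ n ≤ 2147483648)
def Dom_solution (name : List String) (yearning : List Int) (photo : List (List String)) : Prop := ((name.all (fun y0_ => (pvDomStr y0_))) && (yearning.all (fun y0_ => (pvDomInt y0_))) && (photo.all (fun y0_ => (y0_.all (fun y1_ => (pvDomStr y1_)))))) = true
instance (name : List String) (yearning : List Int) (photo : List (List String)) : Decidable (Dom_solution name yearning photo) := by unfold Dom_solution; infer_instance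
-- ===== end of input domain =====

-- B transposes A's traversal: person-outer over the score dict's items, accumulating each
-- person's score into a running answer list by a membership test per photo (no per-photo
-- set(name) construction and no set intersection); an alternative decomposition, not faster.

-- ===== PORT A =====
def solution (name : List String) (yearning : List Int) (photo : List (List String)) : List Int :=
  let score_dict : PySem.Dict String Int :=
    (name.zip yearning).foldl (fun d p => d.insert p.1 p.2) PySem.Dict.empty
  (PySem.List.pyRange 0 (PySem.List.len photo) 1).foldl
    (fun answer i =>
      let intersection : PySem.Set String :=
        PySem.Set.inter (PySem.Set.ofList name) (PySem.Set.ofList (PySem.List.pyGetD photo i []))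
      -- score_dict[j] raises KeyError when j is not a key; Pre_solution excludes exactly
      -- those inputs, so getD _ 0 is exact on the admitted domain
      answer ++ [intersection.foldl (fun s j => s + score_dict.getD j 0) 0])
    []

-- ===== PORT B =====
def solution_alt (name : List String) (yearning : List Int) (photo : List (List String)) : List Int :=
  let score : PySem.Dict String Int :=
    (name.zip yearning).foldl (fun d p => d.insert p.1 p.2) PySem.Dict.empty
  let photoSets : List (PySem.Set String) := photo.map (fun ph => PySem.Set.ofList ph)
  score.items.foldl
    (fun answer p =>
      (answer.zip photoSets).map (fun q => if PySem.Set.contains q.2 p.1 then q.1 + p.2 else q.1))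
    (List.replicate photo.length 0)

-- ===== PRECONDITION & SPEC =====
-- Pre_ excludes exactly the inputs on which A raises KeyError: a name with no yearning score
-- (zip truncation, name longer than yearning) that appears in some photo.
def Pre_solution (name : List String) (yearning : List Int) (photo : List (List String)) : Prop :=
  ∀ s ∈ name, (∃ ph ∈ photo, s ∈ ph) → s ∈ name.take (min name.length yearning.length)
instance (name : List String) (yearning : List Int) (photo : List (List String)) : Decidable (Pre_solution name yearning photo) := by unfold Pre_solution; infer_instance
def pvWitness_solution : List String × List Int × List (List String) :=
  (["a", "b"], [3, 5], [["a"], ["b", "a"], []])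

def Spec_solution (name : List String) (yearning : List Int) (photo : List (List String)) (out : List Int) : Prop := out = solution_alt name yearning photo
instance (name : List String) (yearning : List Int) (photo : List (List String)) (out : List Int) : Decidable (Spec_solution name yearning photo out) := by unfold Spec_solution; infer_instance

-- ===== CLAIM (what is proved, stated in full; the proofs are below) =====
def Claim_equal_solution : Prop := ∀ (name : List String) (yearning : List Int) (photo : List (List String)), Dom_solution name yearning photo → Pre_solution name yearning photo → Spec_solution name yearning photo (solution name yearning photo)

-- ===== LEMMAS AND PROOFS =====

-- zipWith the first list back through a second zipWith over the same right-hand list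
lemma zipWith_zipWith_same {α β : Type} (f g : α → β → α) :
    ∀ (xs : List α) (ys : List β),
      List.zipWith g (List.zipWith f xs ys) ys = List.zipWith (fun a b => g (f a b) b) xs ys := by
  intro xs
  induction xs with
  | nil => intro ys; simp
  | cons x xs ih => intro ys; cases ys with
    | nil => simp
    | cons y ys => simp [ih]

-- zipWith that ignores the right-hand list is the identity when the lengths agree
lemma zipWith_fst_self {α β : Type} :
    ∀ (xs : List α) (ys : List β), xs.length = ys.length →
      List.zipWith (fun a _ => a) xs ys = xs := by
  intro xs
  induction xs with
  | nil => intro ys _; simp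
  | cons x xs ih => intro ys h; cases ys with
    | nil => simp at h
    | cons y ys => simp at h; simp [ih ys h]

-- B's person-outer accumulation, transposed into one zipWith of per-photo-set sums
lemma foldl_person_transpose (photo : List (PySem.Set String)) :
    ∀ (its : List (String × Int)) (ans : List Int), ans.length = photo.length →
      its.foldl
          (fun answer p =>
            (answer.zip photo).map (fun q => if PySem.Set.contains q.2 p.1 then q.1 + p.2 else q.1))
          ans
        = List.zipWith
            (fun a ph => a + (its.map (fun p => if PySem.Set.contains ph p.1 then p.2 else 0)).sum)
            ans photo := by
  intro its
  induction its with
  | nil =>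
      intro ans h
      simp only [List.foldl_nil, List.map_nil, List.sum_nil, add_zero]
      exact (zipWith_fst_self ans photo h).symm
  | cons p rest ih =>
      intro ans h
      have hmz : (ans.zip photo).map (fun q => if PySem.Set.contains q.2 p.1 then q.1 + p.2 else q.1)
          = List.zipWith (fun a b => if PySem.Set.contains b p.1 then a + p.2 else a) ans photo := by
        rw [← List.map_uncurry_zip_eq_zipWith]; rfl
      rw [List.foldl_cons, hmz,
        ih _ (by simp [List.length_zipWith, h]),
        zipWith_zipWith_same]
      have hfun : (fun (a : Int) (b : PySem.Set String) =>
          (if PySem.Set.contains b p.1 then a + p.2 else a)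
            + ((rest.map (fun q => if PySem.Set.contains b q.1 then q.2 else 0)).sum))
          = (fun a b =>
          a + (((p :: rest).map (fun q => if PySem.Set.contains b q.1 then q.2 else 0)).sum)) := by
        funext a b
        simp only [List.map_cons, List.sum_cons]
        split_ifs <;> ring
      rw [hfun]

-- zipWith of sums against an all-zero left list is a map
lemma zipWith_replicate_zero {β : Type} (S : β → Int) :
    ∀ (photo : List β),
      List.zipWith (fun a ph => a + S ph) (List.replicate photo.length (0 : Int)) photo
        = photo.map S := by
  intro photo
  induction photo with
  | nil => simp
  | cons ph rest ih => simp [List.replicate_succ, ih]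

-- a sum of if-guarded values is the sum over the filtered list
lemma sum_map_ite_filter {α : Type} (P : α → Prop) [DecidablePred P] (f : α → Int) :
    ∀ (l : List α),
      (l.map (fun x => if P x then f x else 0)).sum
        = ((l.filter (fun x => decide (P x))).map f).sum := by
  intro l
  induction l with
  | nil => simp
  | cons x xs ih =>
      by_cases h : P x <;> simp [h, ih]

-- a lookup for a person whose key was never inserted yields 0
lemma getD_score_not_key (name : List String) (yearning : List Int) (p : String)
    (h : p ∉ (name.zip yearning).map Prod.fst) :
    ((name.zip yearning).foldl (fun d q => d.insert q.1 q.2)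
      (PySem.Dict.empty : PySem.Dict String Int)).getD p 0 = 0 := by
  apply PySem.Dict.getD_of_not_contains
  rw [PySem.Dict.contains_eq_decide_mem_keys]
  rw [PySem.Dict.keys_foldl_insert_key (name.zip yearning) Prod.fst]
  simp only [decide_eq_false_iff_not, PySem.Dict.keys_empty]
  rw [PySem.Set.update_nil_left]
  intro hmem
  exact h ((PySem.Set.mem_ofList _ _).mp hmem)

-- A's per-photo sum over set(name) & set(ph) equals the sum over the dict's keys in ph
lemma inner_sum_eq (name : List String) (yearning : List Int) (ph : List String) :
    ((PySem.Set.inter (PySem.Set.ofList name) (PySem.Set.ofList ph)).map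
        (fun j => ((name.zip yearning).foldl (fun d q => d.insert q.1 q.2)
          (PySem.Dict.empty : PySem.Dict String Int)).getD j 0)).sum
      = (((PySem.Set.ofList ((name.zip yearning).map Prod.fst)).filter
            (fun k => decide (k ∈ ph))).map
          (fun j => ((name.zip yearning).foldl (fun d q => d.insert q.1 q.2)
            (PySem.Dict.empty : PySem.Dict String Int)).getD j 0)).sum := by
  set d := (name.zip yearning).foldl (fun d q => d.insert q.1 q.2)
    (PySem.Dict.empty : PySem.Dict String Int) with hd
  set nm := (name.zip yearning).map Prod.fst with hnm
  set I := PySem.Set.inter (PySem.Set.ofList name) (PySem.Set.ofList ph) with hI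
  -- split A's intersection by membership in nm; the part outside nm sums to 0
  have hsplit := List.filter_append_perm (fun x => decide (x ∈ nm)) I
  have hL : (I.map (fun j => d.getD j 0)).sum
      = ((I.filter (fun x => decide (x ∈ nm))).map (fun j => d.getD j 0)).sum
        + ((I.filter (fun x => !decide (x ∈ nm))).map (fun j => d.getD j 0)).sum := by
    rw [← List.sum_append, ← List.map_append]
    exact ((hsplit.map _).sum_eq).symm
  have hzero : ((I.filter (fun x => !decide (x ∈ nm))).map (fun j => d.getD j 0)).sum = 0 := by
    apply List.sum_eq_zero
    intro x hx
    obtain ⟨y, hy, rfl⟩ := List.mem_map.mp hx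
    have := (List.mem_filter.mp hy).2
    simp only [Bool.not_eq_true', decide_eq_false_iff_not] at this
    exact getD_score_not_key name yearning y this
  have hsub : ∀ x, x ∈ nm → x ∈ name := by
    intro x hx
    obtain ⟨q, hq, rfl⟩ := List.mem_map.mp hx
    exact (List.of_mem_zip hq).1
  have hperm : (I.filter (fun x => decide (x ∈ nm))).Perm
      ((PySem.Set.ofList nm).filter (fun k => decide (k ∈ ph))) := by
    rw [List.perm_ext_iff_of_nodup
      (List.Nodup.filter _
        (PySem.Set.nodup_inter _ _ (PySem.Set.nodup_ofList name)))
      (List.Nodup.filter _ (PySem.Set.nodup_ofList nm))]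
    intro x
    simp only [List.mem_filter, PySem.Set.mem_inter, PySem.Set.mem_ofList,
      decide_eq_true_eq]
    constructor
    · rintro ⟨⟨_, hxph⟩, hxnm⟩; exact ⟨hxnm, hxph⟩
    · rintro ⟨hxnm, hxph⟩; exact ⟨⟨hsub x hxnm, hxph⟩, hxnm⟩
  rw [hL, hzero, add_zero, (hperm.map _).sum_eq]

-- ===== VERDICT (by name: the statements are the Claim_ definitions above) =====
theorem solution_spec : Claim_equal_solution := by
  intro name yearning photo _ _
  show solution name yearning photo = solution_alt name yearning photo
  unfold solution solution_alt
  simp only []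
  set d := (name.zip yearning).foldl (fun d q => d.insert q.1 q.2)
    (PySem.Dict.empty : PySem.Dict String Int) with hd
  -- A is the map of per-photo intersection sums
  rw [PySem.List.foldl_pyRange_zero_pyGetD photo ([] : List String)
    (fun answer ph =>
      answer ++
        [List.foldl (fun s j => s + d.getD j 0) 0
          ((PySem.Set.ofList name).inter (PySem.Set.ofList ph))]) []]
  rw [PySem.List.foldl_append_singleton_eq_map]
  -- B is the map of per-photo item sums
  rw [foldl_person_transpose (photo.map (fun ph => PySem.Set.ofList ph)) d.items _
      (by simp),
    show photo.length = (photo.map (fun ph => PySem.Set.ofList ph)).length by simp,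
    zipWith_replicate_zero, List.map_map]
  apply List.map_congr_left
  intro ph _
  simp only [Function.comp_apply]
  rw [PySem.List.foldl_add]
  simp only [zero_add]
  -- turn B's item sum into a sum over the dict's keys that appear in ph
  have hnd : d.keys.Nodup := by
    rw [hd]
    exact PySem.Dict.nodup_keys_foldl_insert_key (name.zip yearning) Prod.fst _ _
      PySem.Dict.nodup_keys_empty
  have hkeys : d.keys = PySem.Set.ofList ((name.zip yearning).map Prod.fst) := by
    rw [hd, PySem.Dict.keys_foldl_insert_key (name.zip yearning) Prod.fst,
      PySem.Dict.keys_empty, PySem.Set.update_nil_left]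
  rw [PySem.Dict.items_eq_map_keys d hnd 0]
  rw [List.map_map]
  have : ((fun p : String × Int => if PySem.Set.contains (PySem.Set.ofList ph) p.1 then p.2 else 0)
        ∘ fun k => (k, d.getD k 0))
      = fun k => if k ∈ ph then d.getD k 0 else 0 := by
    funext k
    have hc : PySem.Set.contains (PySem.Set.ofList ph) k = decide (k ∈ ph) := by
      simp [pysem]
    simp only [Function.comp, hc]
    by_cases hk : k ∈ ph <;> simp [hk]
  rw [this, sum_map_ite_filter (fun k => k ∈ ph) (fun k => d.getD k 0) d.keys, hkeys]
  exact inner_sum_eq name yearning ph
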